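-- pv_equiv track=rewrite | github.com/jacoby149/initiald | initiald/initiald.py | get_all_dirs
-- ===== SOURCE A (Python) =====
-- sys_string = '/'
--
-- def get_all_dirs(dir_set):
--     lastlength = 0
--     while len(dir_set) != lastlength:
--         dir_new = set(dir_set)
--         lastlength = len(dir_set)
--         for d in dir_set:
--             parent = sys_string.join(d.split(sys_string)[:-1])
--             if parent not in dir_set and parent != '':
--                 dir_new.add(parent)
--         dir_set = dir_new
--     return dir_set
-- ===== SOURCE B (Python) =====
-- sys_string = '/'
--
-- def get_all_dirs(dir_set):
--     # single worklist pass: append each newly discovered parent once and process it in turn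
--     out = list(dict.fromkeys(dir_set))
--     seen = set(out)
--     for d in out:
--         parent = sys_string.join(d.split(sys_string)[:-1])
--         if parent != '' and parent not in seen:
--             seen.add(parent)
--             out.append(parent)
--     return seen
-- ===== Notes on version B (the rewrite author's own statement) =====
-- stated objective: alternative
-- what changed: Replaces A's repeat-until-no-growth rounds (each round rebuilds the set and rescans every element) by a single worklist pass over one growing list that appends each newly discovered parent once and later processes it in turn.
import Mathlib
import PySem

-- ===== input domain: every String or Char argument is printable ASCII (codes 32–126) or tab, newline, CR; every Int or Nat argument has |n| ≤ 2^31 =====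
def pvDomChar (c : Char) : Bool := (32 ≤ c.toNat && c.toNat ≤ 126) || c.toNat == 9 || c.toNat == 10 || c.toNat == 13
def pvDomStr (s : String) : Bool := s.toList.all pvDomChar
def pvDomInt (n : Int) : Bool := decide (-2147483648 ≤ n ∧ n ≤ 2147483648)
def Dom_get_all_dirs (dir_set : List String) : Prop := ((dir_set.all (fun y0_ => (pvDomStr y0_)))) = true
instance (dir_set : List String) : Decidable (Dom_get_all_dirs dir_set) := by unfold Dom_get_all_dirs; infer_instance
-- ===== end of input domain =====

-- B replaces A's repeat-until-no-growth rounds by a single worklist pass over one growing list.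

-- sys_string = '/'
def sys_string : String := "/"

-- shared by both ports: the Python expression sys_string.join(d.split(sys_string)[:-1])
-- (d.split('/') never raises since the separator is nonempty, so split? is always `some`; getD [] is a totality guard)
def pvParent (d : String) : String :=
  PySem.Str.join sys_string (PySem.List.slice ((PySem.Str.split? d sys_string).getD []) none (some (-1)))

-- fuel bound used by both ports (a totality guard only: provably enough iterations)
def pvMeasure (todo : List String) : Nat := (todo.map (fun d => 2 * d.toList.length + 1)).sum

-- ===== PORT A =====
-- while len(dir_set) != lastlength: dir_new = set(dir_set); lastlength = len(dir_set);
--   for d in dir_set: parent = …; if parent not in dir_set and parent != '': dir_new.add(parent); dir_set = dir_new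
def get_all_dirs_loop : Nat → List String → Nat → List String
  | 0, ds, _ => ds
  | fuel+1, ds, lastlength =>
    if ds.length ≠ lastlength then
      let dn := ds.foldl (fun s d =>
        let p := pvParent d
        if p ∉ ds ∧ p ≠ "" then PySem.Set.add s p else s) (PySem.Set.ofList ds)
      get_all_dirs_loop fuel dn ds.length
    else ds

def get_all_dirs (dir_set : List String) : List String :=
  get_all_dirs_loop (pvMeasure dir_set + 2) dir_set 0

-- ===== PORT B =====
-- out = list(dict.fromkeys(dir_set)); seen = set(out); for d in out (a growing list, modeled by an index loop):
--   if parent != '' and parent not in seen: append to seen and out; return seen (= the distinct elements of out)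
def get_all_dirs_alt_loop : Nat → List String → Nat → List String
  | 0, out, _ => out
  | fuel+1, out, i =>
    if h : i < out.length then
      let p := pvParent out[i]
      get_all_dirs_alt_loop fuel (if p ≠ "" ∧ p ∉ out then out ++ [p] else out) (i+1)
    else out

def get_all_dirs_alt (dir_set : List String) : List String :=
  let out := PySem.Set.ofList dir_set
  get_all_dirs_alt_loop (pvMeasure out + 1) out 0

-- ===== PRECONDITION & SPEC =====
-- The Python argument is a set[str]; under the type convention its List model holds DISTINCT
-- elements, so Pre_ is exactly the set-representation invariant (it excludes no set input).
def Pre_get_all_dirs (dir_set : List String) : Prop := dir_set.Nodup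
instance (dir_set : List String) : Decidable (Pre_get_all_dirs dir_set) := by unfold Pre_get_all_dirs; infer_instance

def pvWitness_get_all_dirs : List String := ["a/b/c", "x/y", "a"]

def Spec_get_all_dirs (dir_set : List String) (out : List String) : Prop := out = get_all_dirs_alt dir_set
instance (dir_set : List String) (out : List String) : Decidable (Spec_get_all_dirs dir_set out) := by unfold Spec_get_all_dirs; infer_instance

-- ===== CLAIM (what is proved, stated in full; the proofs are below) =====
def Claim_equal_get_all_dirs : Prop := ∀ (dir_set : List String), Dom_get_all_dirs dir_set → Pre_get_all_dirs dir_set → Spec_get_all_dirs dir_set (get_all_dirs dir_set)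

-- ===== LEMMAS AND PROOFS =====

-- ---- the parent operation at the character level ----
def pvParentC (cs : List Char) : List Char :=
  PySem.Chars.join ['/'] ((PySem.Chars.splitOn cs ['/']).dropLast)

theorem pv_join_snoc (xs : List (List Char)) (x : List Char) :
    PySem.Chars.join ['/'] (xs ++ [x]) =
      (if xs = [] then [] else PySem.Chars.join ['/'] xs ++ ['/']) ++ x := by
  induction xs with
  | nil => simp [PySem.Chars.join_singleton]
  | cons a t ih =>
    cases t with
    | nil => simp [PySem.Chars.join_cons_cons, PySem.Chars.join_singleton]
    | cons b t' =>
      simp only [List.cons_append] at ih ⊢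
      rw [PySem.Chars.join_cons_cons, ih]
      simp [PySem.Chars.join_cons_cons]

theorem pv_join_revcons (cur : List Char) (acc : List (List Char)) :
    PySem.Chars.join ['/'] ((cur :: acc).reverse) =
      (if acc = [] then [] else PySem.Chars.join ['/'] acc.reverse ++ ['/']) ++ cur := by
  rw [List.reverse_cons, pv_join_snoc]
  simp

theorem pv_go_join (f : Nat) : ∀ (l cur : List Char) (acc : List (List Char)), l.length ≤ f →
    PySem.Chars.join ['/'] (PySem.Chars.splitOn.go ['/'] f l cur acc) =
      (if acc = [] then [] else PySem.Chars.join ['/'] acc.reverse ++ ['/']) ++ cur.reverse ++ l := by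
  induction f with
  | zero =>
    intro l cur acc hl
    have : l = [] := List.eq_nil_of_length_eq_zero (Nat.le_zero.mp hl)
    subst this
    rw [PySem.Chars.splitOn.go, List.append_nil, pv_join_revcons]
    simp
  | succ f ih =>
    intro l cur acc hl
    cases l with
    | nil =>
      rw [PySem.Chars.splitOn.go]
      · rw [pv_join_revcons]; simp
      · omega
    | cons c rest =>
      rw [PySem.Chars.splitOn.go]
      by_cases hc : ['/'].isPrefixOf (c :: rest)
      · rw [if_pos hc]
        have hc' : c = '/' := by simp [List.isPrefixOf] at hc; exact hc.symm
        subst hc'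
        simp only [List.length_cons] at hl
        rw [ih _ _ _ (by simp; omega)]
        rw [pv_join_revcons]
        cases acc with
        | nil => simp
        | cons a as => simp
      · rw [if_neg hc]
        simp only [List.length_cons] at hl
        rw [ih _ _ _ (by omega)]
        simp

theorem pv_go_ne_nil (f : Nat) : ∀ (l cur : List Char) (acc : List (List Char)),
    PySem.Chars.splitOn.go ['/'] f l cur acc ≠ [] := by
  induction f with
  | zero => intro l cur acc; rw [PySem.Chars.splitOn.go]; simp
  | succ f ih =>
    intro l cur acc
    cases l with
    | nil =>
      rw [PySem.Chars.splitOn.go]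
      · simp
      · omega
    | cons c rest =>
      rw [PySem.Chars.splitOn.go]
      split
      · exact ih _ _ _
      · exact ih _ _ _

theorem pv_join_splitOn (cs : List Char) :
    PySem.Chars.join ['/'] (PySem.Chars.splitOn cs ['/']) = cs := by
  unfold PySem.Chars.splitOn
  rw [pv_go_join (cs.length + 1) cs [] [] (by omega)]
  simp

theorem pv_splitOn_ne_nil (cs : List Char) : PySem.Chars.splitOn cs ['/'] ≠ [] := by
  unfold PySem.Chars.splitOn; exact pv_go_ne_nil _ _ _ _

theorem pv_parentC_length (cs : List Char) (h : pvParentC cs ≠ []) :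
    (pvParentC cs).length < cs.length := by
  have hne : PySem.Chars.splitOn cs ['/'] ≠ [] := pv_splitOn_ne_nil cs
  have hd : (PySem.Chars.splitOn cs ['/']).dropLast ≠ [] := by
    intro hdl
    exact h (by simp [pvParentC, hdl, PySem.Chars.join_nil])
  have hsplit := List.dropLast_append_getLast hne
  have hcs : cs = PySem.Chars.join ['/'] (PySem.Chars.splitOn cs ['/']) := (pv_join_splitOn cs).symm
  rw [← hsplit, pv_join_snoc, if_neg hd] at hcs
  have hlen := congrArg List.length hcs
  simp [List.length_append] at hlen
  have hp : (pvParentC cs).length = (PySem.Chars.join ['/'] (PySem.Chars.splitOn cs ['/']).dropLast).length := rfl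
  omega

-- ---- bridge String ↔ Chars ----
theorem pv_slice_neg_one {α : Type} (xs : List α) :
    PySem.List.slice xs none (some (-1)) = xs.dropLast := by
  cases xs with
  | nil => simp [PySem.List.slice, PySem.List.clampIdx]
  | cons a t =>
    simp [PySem.List.slice, PySem.List.clampIdx, List.dropLast_eq_take]
    split_ifs <;> omega

theorem pv_toList_slash : "/".toList = ['/'] := rfl

theorem pv_parent_eq (d : String) : pvParent d = String.ofList (pvParentC d.toList) := by
  unfold pvParent sys_string pvParentC
  have h1 : PySem.Str.split? d "/" = some ((PySem.Chars.splitOn d.toList ['/']).map String.ofList) := by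
    rw [PySem.Str.split?]
    simp [PySem.Chars.split?, pv_toList_slash]
  rw [h1]
  simp only [Option.getD_some]
  rw [pv_slice_neg_one, ← List.map_dropLast, PySem.Str.join]
  simp [List.map_map, Function.comp_def, String.toList_ofList, pv_toList_slash]

theorem pv_parent_toList (d : String) : (pvParent d).toList = pvParentC d.toList := by
  rw [pv_parent_eq, String.toList_ofList]

theorem pv_parent_length (d : String) (h : pvParent d ≠ "") :
    (pvParent d).toList.length < d.toList.length := by
  rw [pv_parent_toList]
  apply pv_parentC_length
  intro hnil
  apply h
  rw [pv_parent_eq, hnil]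

-- ---- the closure combinatorics ----
def pvFoldAcc (s : List String) : List String → List String
  | [] => s
  | d :: t =>
    if pvParent d ≠ "" ∧ pvParent d ∉ s then pvFoldAcc (s ++ [pvParent d]) t else pvFoldAcc s t

def pvNew (s : List String) : List String → List String
  | [] => []
  | d :: t =>
    if pvParent d ≠ "" ∧ pvParent d ∉ s then pvParent d :: pvNew (s ++ [pvParent d]) t else pvNew s t

theorem pvMeasure_nil : pvMeasure [] = 0 := rfl

theorem pvMeasure_cons (d : String) (t : List String) :
    pvMeasure (d :: t) = 2 * d.toList.length + 1 + pvMeasure t := by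
  simp [pvMeasure]

theorem pvMeasure_append (t1 t2 : List String) :
    pvMeasure (t1 ++ t2) = pvMeasure t1 + pvMeasure t2 := by
  simp [pvMeasure]

theorem pvMeasure_eq_zero (t : List String) (h : pvMeasure t = 0) : t = [] := by
  cases t with
  | nil => rfl
  | cons d t => rw [pvMeasure_cons] at h; omega

theorem pvMeasure_pos (t : List String) (h : t ≠ []) : 1 ≤ pvMeasure t := by
  cases t with
  | nil => exact absurd rfl h
  | cons d t => rw [pvMeasure_cons]; omega

def pvChase (acc : List String) (todo : List String) : List String :=
  match todo with
  | [] => acc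
  | d :: t =>
    if h : pvParent d ≠ "" ∧ pvParent d ∉ acc then pvChase (acc ++ [pvParent d]) (t ++ [pvParent d])
    else pvChase acc t
termination_by pvMeasure todo
decreasing_by
  · have hlt := pv_parent_length d h.1
    rw [pvMeasure_append, pvMeasure_cons, pvMeasure_cons, pvMeasure_nil]
    omega
  · rw [pvMeasure_cons]; omega

theorem pv_foldAcc_eq_append (t : List String) : ∀ s, pvFoldAcc s t = s ++ pvNew s t := by
  induction t with
  | nil => intro s; simp [pvFoldAcc, pvNew]
  | cons d t ih =>
    intro s
    simp only [pvFoldAcc, pvNew]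
    split_ifs with h
    · rw [ih]; simp
    · rw [ih]

theorem pv_measure_new (t : List String) :
    ∀ s, pvMeasure (pvNew s t) + (pvNew s t).length ≤ pvMeasure t := by
  induction t with
  | nil => intro s; simp [pvNew, pvMeasure_nil]
  | cons d t ih =>
    intro s
    simp only [pvNew]
    split_ifs with h
    · have hlt := pv_parent_length d h.1
      have := ih (s ++ [pvParent d])
      rw [pvMeasure_cons, pvMeasure_cons]
      simp only [List.length_cons]
      omega
    · have := ih s
      rw [pvMeasure_cons]
      omega

theorem pv_mem_foldAcc (t : List String) : ∀ s x, x ∈ s → x ∈ pvFoldAcc s t := by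
  intro s x hx
  rw [pv_foldAcc_eq_append]
  exact List.mem_append_left _ hx

theorem pv_parent_mem_foldAcc (t : List String) :
    ∀ s d, d ∈ t → pvParent d = "" ∨ pvParent d ∈ pvFoldAcc s t := by
  induction t with
  | nil => simp
  | cons e t ih =>
    intro s d hd
    rcases List.mem_cons.mp hd with rfl | hd'
    · simp only [pvFoldAcc]
      split_ifs with h
      · right; exact pv_mem_foldAcc t _ _ (by simp)
      · rcases not_and_or.mp h with h1 | h2
        · left; simpa using h1
        · right; exact pv_mem_foldAcc t _ _ (by simpa using h2)
    · simp only [pvFoldAcc]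
      split_ifs with h
      · exact ih _ _ hd'
      · exact ih _ _ hd'

theorem pv_nodup_foldAcc (t : List String) : ∀ s, s.Nodup → (pvFoldAcc s t).Nodup := by
  induction t with
  | nil => intro s hs; simpa [pvFoldAcc] using hs
  | cons d t ih =>
    intro s hs
    simp only [pvFoldAcc]
    split_ifs with h
    · refine ih _ ?_
      rw [List.nodup_append]
      refine ⟨hs, List.nodup_singleton _, ?_⟩
      intro a ha b hb
      rw [List.mem_singleton] at hb
      subst hb
      exact fun hab => h.2 (hab ▸ ha)
    · exact ih _ hs

theorem pv_foldAcc_append (t1 t2 : List String) :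
    ∀ s, pvFoldAcc s (t1 ++ t2) = pvFoldAcc (pvFoldAcc s t1) t2 := by
  induction t1 with
  | nil => intro s; simp [pvFoldAcc]
  | cons d t ih =>
    intro s
    simp only [List.cons_append, pvFoldAcc]
    split_ifs with h
    · exact ih _
    · exact ih _

theorem pv_foldAcc_covered (P : List String) (acc0 : List String) :
    ∀ s, (∀ d ∈ P, pvParent d = "" ∨ pvParent d ∈ acc0) → acc0 ⊆ s → pvFoldAcc s P = s := by
  induction P with
  | nil => intro s _ _; simp [pvFoldAcc]
  | cons d P ih =>
    intro s hcov hsub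
    simp only [pvFoldAcc]
    have hcd := hcov d (by simp)
    have hfalse : ¬(pvParent d ≠ "" ∧ pvParent d ∉ s) := by
      rcases hcd with h | h
      · simp [h]
      · intro hc; exact hc.2 (hsub h)
    rw [if_neg hfalse]
    exact ih s (fun e he => hcov e (by simp [he])) hsub

theorem pv_chase_stage (t : List String) :
    ∀ acc extra, pvChase acc (t ++ extra) = pvChase (pvFoldAcc acc t) (extra ++ pvNew acc t) := by
  induction t with
  | nil => intro acc extra; simp [pvFoldAcc, pvNew]
  | cons d t ih =>
    intro acc extra
    simp only [List.cons_append, pvFoldAcc, pvNew]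
    rw [pvChase]
    split_ifs with h
    · have hasc : (t ++ extra) ++ [pvParent d] = t ++ (extra ++ [pvParent d]) := by simp
      rw [hasc, ih _ (extra ++ [pvParent d])]
      simp
    · exact ih _ _

theorem pv_round_eq (frozen : List String) (todo : List String) :
    ∀ s, frozen ⊆ s →
      todo.foldl (fun s d =>
        let p := pvParent d
        if p ∉ frozen ∧ p ≠ "" then PySem.Set.add s p else s) s = pvFoldAcc s todo := by
  induction todo with
  | nil => intro s _; simp [pvFoldAcc]
  | cons d t ih =>
    intro s hsub
    rw [List.foldl_cons]
    simp only [pvFoldAcc]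
    by_cases h : pvParent d ≠ "" ∧ pvParent d ∉ s
    · have hnf : pvParent d ∉ frozen := fun hf => h.2 (hsub hf)
      rw [if_pos h]
      have hstep : (if pvParent d ∉ frozen ∧ pvParent d ≠ "" then PySem.Set.add s (pvParent d) else s)
          = s ++ [pvParent d] := by
        rw [if_pos (And.intro hnf h.1), PySem.Set.add_eq_ite, if_neg h.2]
      rw [hstep]
      exact ih _ (fun x hx => List.mem_append_left _ (hsub hx))
    · rw [if_neg h]
      have hstep : (if pvParent d ∉ frozen ∧ pvParent d ≠ "" then PySem.Set.add s (pvParent d) else s)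
          = s := by
        by_cases hp : pvParent d ∈ s
        · split_ifs with hc
          · rw [PySem.Set.add_eq_ite, if_pos hp]
          · rfl
        · have hpe : pvParent d = "" := by
            rcases not_and_or.mp h with h1 | h2
            · simpa using h1
            · exact absurd (by simpa using h2) hp
          rw [if_neg (by simp [hpe])]
      rw [hstep]
      exact ih s hsub

theorem pv_bloop_eq_chase (f : Nat) :
    ∀ out i, pvMeasure (out.drop i) ≤ f →
      get_all_dirs_alt_loop f out i = pvChase out (out.drop i) := by
  induction f with
  | zero =>
    intro out i hm
    have hnil : out.drop i = [] := pvMeasure_eq_zero _ (Nat.le_zero.mp hm)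
    rw [hnil]
    simp [get_all_dirs_alt_loop, pvChase]
  | succ f ih =>
    intro out i hm
    simp only [get_all_dirs_alt_loop]
    by_cases h : i < out.length
    · rw [dif_pos h]
      have hdrop : out.drop i = out[i] :: out.drop (i+1) := List.drop_eq_getElem_cons h
      generalize hgen : out[i] = d at hdrop ⊢
      by_cases hc : pvParent d ≠ "" ∧ pvParent d ∉ out
      · rw [if_pos hc]
        have hlt := pv_parent_length d hc.1
        have hd2 : (out ++ [pvParent d]).drop (i+1) = out.drop (i+1) ++ [pvParent d] := by
          rw [List.drop_append_of_le_length (by omega)]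
        have hm' : pvMeasure ((out ++ [pvParent d]).drop (i+1)) ≤ f := by
          rw [hd2, pvMeasure_append, pvMeasure_cons, pvMeasure_nil]
          rw [hdrop, pvMeasure_cons] at hm
          omega
        rw [ih _ _ hm', hdrop, pvChase, dif_pos hc, hd2]
      · rw [if_neg hc]
        have hm' : pvMeasure (out.drop (i+1)) ≤ f := by
          rw [hdrop, pvMeasure_cons] at hm; omega
        rw [ih _ _ hm', hdrop, pvChase, dif_neg hc]
    · rw [dif_neg h]
      have hnil : out.drop i = [] := by
        rw [List.drop_eq_nil_iff]
        omega
      rw [hnil]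
      simp [pvChase]

theorem pv_loopA_eq_chase (f : Nat) :
    ∀ (P T acc : List String), acc = P ++ T → acc.Nodup →
      (∀ d ∈ P, pvParent d = "" ∨ pvParent d ∈ acc) →
      pvMeasure T + 2 ≤ f →
      get_all_dirs_loop f acc P.length = pvChase acc T := by
  induction f with
  | zero => intro P T acc _ _ _ hf; omega
  | succ f ih =>
    intro P T acc hPT hnd hcov hf
    by_cases hT : T = []
    · subst hT
      rw [List.append_nil] at hPT
      subst hPT
      simp only [get_all_dirs_loop]
      rw [if_neg (by simp)]
      simp [pvChase]
    · have hTlen : 0 < T.length := List.length_pos_of_ne_nil hT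
      simp only [get_all_dirs_loop]
      rw [if_pos (by rw [hPT]; simp; omega)]
      have hround : acc.foldl (fun s d =>
          let p := pvParent d
          if p ∉ acc ∧ p ≠ "" then PySem.Set.add s p else s) (PySem.Set.ofList acc)
          = acc ++ pvNew acc T := by
        rw [PySem.Set.ofList_eq_self_of_nodup acc hnd]
        rw [pv_round_eq acc acc acc (fun x hx => hx)]
        rw [congrArg (fun t => pvFoldAcc acc t) hPT]
        rw [pv_foldAcc_append]
        rw [pv_foldAcc_covered P acc acc (fun d hd => hcov d hd) (fun x hx => hx)]
        exact pv_foldAcc_eq_append T acc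
      rw [hround]
      have hstage := pv_chase_stage T acc []
      simp only [List.append_nil, List.nil_append] at hstage
      rw [pv_foldAcc_eq_append] at hstage
      by_cases hN : pvNew acc T = []
      · rw [hN, List.append_nil]
        have hf2 : 1 ≤ f := by
          have := pvMeasure_pos T hT
          omega
        obtain ⟨f', rfl⟩ : ∃ f', f = f' + 1 := ⟨f - 1, by omega⟩
        simp only [get_all_dirs_loop]
        rw [if_neg (by simp)]
        rw [hstage, hN, List.append_nil]
        simp [pvChase]
      · rw [hstage]
        have hNlen : 1 ≤ (pvNew acc T).length := by
          cases hq : pvNew acc T with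
          | nil => exact absurd hq hN
          | cons a b => simp
        have hmn := pv_measure_new T acc
        have happ := ih acc (pvNew acc T) (acc ++ pvNew acc T) rfl
          (by rw [← pv_foldAcc_eq_append]; exact pv_nodup_foldAcc T acc hnd)
          (by
            intro d hd
            rw [hPT] at hd
            rcases List.mem_append.mp hd with hdP | hdT
            · rcases hcov d hdP with h1 | h1
              · exact Or.inl h1
              · exact Or.inr (List.mem_append_left _ h1)
            · rw [← pv_foldAcc_eq_append]
              exact pv_parent_mem_foldAcc T acc d hdT)
          (by omega)
        exact happ

-- ===== VERDICT (by name: the statement is the Claim_ definition above) =====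
theorem get_all_dirs_spec : Claim_equal_get_all_dirs := by
  intro ds _ hpre
  unfold Spec_get_all_dirs get_all_dirs get_all_dirs_alt
  have hset : PySem.Set.ofList ds = ds := PySem.Set.ofList_eq_self_of_nodup ds hpre
  rw [hset]
  have hA := pv_loopA_eq_chase (pvMeasure ds + 2) [] ds ds (by simp) hpre (by simp) (by omega)
  simp only [List.length_nil] at hA
  have hB := pv_bloop_eq_chase (pvMeasure ds + 1) ds 0 (by simp)
  simp only [List.drop_zero] at hB
  rw [hA, hB]
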